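-- pv_equiv track=rewrite | github.com/nbratek/TW | zad3/zad3/fnf.py | initialize_classes
-- ===== SOURCE A (Python) =====
-- def initialize_classes(graph):
--     all_targets = set()
--     for edges in graph:
--         all_targets.update(edges)
--     num_vertices = len(graph)
--     start_points = {i for i in range(num_vertices) if i not in all_targets}
--     classes = [-1] * num_vertices
--     for point in start_points:
--         classes[point] = 0
--     return classes
-- ===== SOURCE B (Python) =====
-- def initialize_classes(graph):
--     n = len(graph)
--     classes = [0] * n
--     for edges in graph:
--         for t in edges:
--             if 0 <= t < n:
--                 classes[t] = -1
--     return classes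
-- ===== Notes on version B (the rewrite author's own statement) =====
-- stated objective: simpler
-- what changed: Instead of collecting all targets into a set, building the complement set of source vertices and patching a [-1]*n array, B starts from [0]*n and demotes each in-range target to -1 in a single edge pass.
import Mathlib
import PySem

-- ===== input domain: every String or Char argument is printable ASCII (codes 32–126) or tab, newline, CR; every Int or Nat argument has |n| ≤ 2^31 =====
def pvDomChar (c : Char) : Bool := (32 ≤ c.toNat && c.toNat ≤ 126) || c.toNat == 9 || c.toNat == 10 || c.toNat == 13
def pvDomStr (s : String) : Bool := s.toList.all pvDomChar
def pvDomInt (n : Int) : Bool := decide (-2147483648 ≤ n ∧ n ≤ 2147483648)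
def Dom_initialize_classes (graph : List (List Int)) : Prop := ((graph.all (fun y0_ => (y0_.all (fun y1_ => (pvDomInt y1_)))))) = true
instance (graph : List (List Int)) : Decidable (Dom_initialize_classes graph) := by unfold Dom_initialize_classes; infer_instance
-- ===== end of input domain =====

-- B replaces A's target-set + complement-set construction by one edge pass that demotes
-- in-range targets in the result array directly (objective: simpler).

-- ===== PORT A =====
def initialize_classes (graph : List (List Int)) : List Int :=
  let all_targets : PySem.Set Int :=
    graph.foldl (fun s edges => PySem.Set.update s edges) PySem.Set.empty
  let num_vertices := graph.length
  let start_points : PySem.Set Int :=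
    PySem.Set.ofList ((PySem.List.pyRange 0 (num_vertices : Int) 1).filter
      (fun i => !(PySem.Set.contains all_targets i)))
  let classes : List Int := List.replicate num_vertices (-1)
  -- iteration over the set: result is order-independent (distinct indices assigned)
  start_points.foldl (fun cs point => PySem.List.pySetD cs point 0) classes

-- ===== PORT B =====
def initialize_classes_alt (graph : List (List Int)) : List Int :=
  let n := graph.length
  let classes : List Int := List.replicate n 0
  graph.foldl (fun cs edges =>
    edges.foldl (fun cs t =>
      if 0 ≤ t ∧ t < (n : Int) then PySem.List.pySetD cs t (-1) else cs) cs) classes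

-- ===== PRECONDITION & SPEC =====
def Spec_initialize_classes (graph : List (List Int)) (out : List Int) : Prop := out = initialize_classes_alt graph
instance (graph : List (List Int)) (out : List Int) : Decidable (Spec_initialize_classes graph out) := by unfold Spec_initialize_classes; infer_instance

-- ===== CLAIM (what is proved, stated in full; the proofs are below) =====
def Claim_equal_initialize_classes : Prop := ∀ (graph : List (List Int)), Dom_initialize_classes graph → Spec_initialize_classes graph (initialize_classes graph)

-- ===== LEMMAS AND PROOFS =====

-- A's assignment loop: element i becomes v exactly when (i:Int) is in the index list,
-- provided every index in the list is in range.
theorem foldl_pySetD_getElem? (l : List Int) (v : Int) (cs : List Int)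
    (h : ∀ p ∈ l, 0 ≤ p ∧ p < (cs.length : Int)) (i : Nat) :
    (l.foldl (fun cs p => PySem.List.pySetD cs p v) cs)[i]? =
      if (i : Int) ∈ l then some v else cs[i]? := by
  induction l generalizing cs with
  | nil => simp
  | cons p l ih =>
    have hp := h p (by simp)
    have hcs : PySem.List.pySetD cs p v = cs.set p.toNat v :=
      PySem.List.pySetD_of_nonneg cs v hp.1
    simp only [List.foldl_cons, List.mem_cons]
    rw [ih _ (by intro q hq; have := h q (by simp [hq]); simpa [hcs] using this)]
    by_cases hmem : (i : Int) ∈ l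
    · simp [hmem]
    · simp only [hmem, or_false, hcs, List.getElem?_set]
      by_cases hip : (i : Int) = p
      · have : p.toNat = i := by omega
        simp [this, hip, show i < cs.length by omega]
      · have : p.toNat ≠ i := by omega
        simp [this, hip]

-- Membership in A's accumulated target set.
theorem mem_foldl_update (gs : List (List Int)) (s : PySem.Set Int) (y : Int) :
    y ∈ gs.foldl (fun s edges => PySem.Set.update s edges) s ↔
      y ∈ s ∨ ∃ e ∈ gs, y ∈ e := by
  induction gs generalizing s with
  | nil => simp
  | cons e gs ih =>
    simp only [List.foldl_cons, ih, PySem.Set.mem_update]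
    constructor
    · rintro (⟨h | h⟩ | ⟨e', he', hy⟩)
      · exact Or.inl h
      · exact Or.inr ⟨e, by simp, h⟩
      · exact Or.inr ⟨e', by simp [he'], hy⟩
    · rintro (h | ⟨e', he', hy⟩)
      · exact Or.inl (Or.inl h)
      · rcases List.mem_cons.mp he' with rfl | he'
        · exact Or.inl (Or.inr hy)
        · exact Or.inr ⟨e', he', hy⟩

-- B's inner loop over one edge list.
theorem inner_foldl_getElem? (edges : List Int) (n : Int) (cs : List Int)
    (hlen : (cs.length : Int) = n) (i : Nat) :
    (edges.foldl (fun cs t =>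
        if 0 ≤ t ∧ t < n then PySem.List.pySetD cs t (-1) else cs) cs)[i]? =
      if (i : Int) ∈ edges ∧ (i : Int) < n then some (-1) else cs[i]? := by
  induction edges generalizing cs with
  | nil => simp
  | cons t edges ih =>
    simp only [List.foldl_cons]
    by_cases ht : 0 ≤ t ∧ t < n
    · have hset : PySem.List.pySetD cs t (-1) = cs.set t.toNat (-1) :=
        PySem.List.pySetD_of_nonneg cs (-1) ht.1
      rw [if_pos ht, ih _ (by simp [hset, hlen])]
      by_cases hmem : (i : Int) ∈ edges ∧ (i : Int) < n
      · simp [hmem, List.mem_cons]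
      · simp only [hmem, if_false, hset, List.getElem?_set, List.mem_cons]
        by_cases hit : (i : Int) = t
        · have h1 : t.toNat = i := by omega
          have h2 : i < cs.length := by omega
          simp only [h1, h2, hit, eq_self_iff_true, if_true]
          rw [if_pos ⟨Or.inl trivial, hit ▸ ht.2⟩]
        · have hne : t.toNat ≠ i := by omega
          rw [if_neg hne, if_neg (by
            rintro ⟨h1 | h1, h2⟩
            · exact hit h1
            · exact hmem ⟨h1, h2⟩)]
    · rw [if_neg ht, ih _ hlen]
      have : ((i : Int) ∈ t :: edges ∧ (i : Int) < n) ↔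
          ((i : Int) ∈ edges ∧ (i : Int) < n) := by
        simp only [List.mem_cons]
        constructor
        · rintro ⟨rfl | h1, h2⟩
          · exact absurd ⟨by positivity, h2⟩ ht
          · exact ⟨h1, h2⟩
        · rintro ⟨h1, h2⟩; exact ⟨Or.inr h1, h2⟩
      rw [if_congr this rfl rfl]
  -- (structure follows B's nested loop)

-- B's outer loop.
theorem outer_foldl_getElem? (gs : List (List Int)) (n : Int) (cs : List Int)
    (hlen : (cs.length : Int) = n) (i : Nat) :
    (gs.foldl (fun cs edges => edges.foldl (fun cs t =>
        if 0 ≤ t ∧ t < n then PySem.List.pySetD cs t (-1) else cs) cs) cs)[i]? =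
      if (∃ e ∈ gs, (i : Int) ∈ e) ∧ (i : Int) < n then some (-1) else cs[i]? := by
  induction gs generalizing cs with
  | nil => simp
  | cons e gs ih =>
    simp only [List.foldl_cons]
    have hlen' : ((e.foldl (fun cs t =>
        if 0 ≤ t ∧ t < n then PySem.List.pySetD cs t (-1) else cs) cs).length : Int) = n := by
      clear ih
      induction e generalizing cs with
      | nil => simpa
      | cons t e ihe =>
        simp only [List.foldl_cons]
        by_cases ht : 0 ≤ t ∧ t < n
        · rw [if_pos ht]
          exact ihe _ (by rw [PySem.List.pySetD_of_nonneg cs (-1) ht.1]; simpa)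
        · rw [if_neg ht]; exact ihe _ hlen
    rw [ih _ hlen', inner_foldl_getElem? e n cs hlen i]
    by_cases hrest : (∃ e' ∈ gs, (i : Int) ∈ e') ∧ (i : Int) < n
    · rw [if_pos hrest,
        if_pos ⟨⟨hrest.1.choose, List.mem_cons_of_mem _ hrest.1.choose_spec.1,
          hrest.1.choose_spec.2⟩, hrest.2⟩]
    · rw [if_neg hrest]
      by_cases hin : (i : Int) ∈ e ∧ (i : Int) < n
      · rw [if_pos hin, if_pos ⟨⟨e, by simp, hin.1⟩, hin.2⟩]
      · rw [if_neg hin, if_neg (by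
          rintro ⟨⟨e', he', hy⟩, h2⟩
          rcases List.mem_cons.mp he' with rfl | he'
          · exact hin ⟨hy, h2⟩
          · exact hrest ⟨⟨e', he', hy⟩, h2⟩)]

theorem initialize_classes_spec : Claim_equal_initialize_classes := by
  intro graph _
  unfold Spec_initialize_classes initialize_classes initialize_classes_alt
  simp only []
  set n := graph.length with hn
  set targets := graph.foldl (fun s edges => PySem.Set.update s edges) PySem.Set.empty with htg
  set sp := PySem.Set.ofList ((PySem.List.pyRange 0 (n : Int) 1).filter
      (fun i => !(PySem.Set.contains targets i))) with hsp
  have hspMem : ∀ y : Int, y ∈ sp ↔ (0 ≤ y ∧ y < (n : Int)) ∧ y ∉ targets := by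
    intro y
    rw [hsp, PySem.Set.mem_ofList, List.mem_filter]
    simp [PySem.List.mem_pyRange_one]
  apply List.ext_getElem?
  intro i
  rw [foldl_pySetD_getElem? sp 0 (List.replicate n (-1))
        (by intro p hp
            have := (hspMem p).mp hp
            simpa using this.1) i,
      outer_foldl_getElem? graph (n : Int) (List.replicate n 0) (by simp) i]
  have htgMem : ∀ y : Int, y ∈ targets ↔ ∃ e ∈ graph, y ∈ e := by
    intro y; rw [htg, mem_foldl_update]; simp [PySem.Set.empty]
  by_cases hi : i < n
  · have hrep1 : (List.replicate n (-1 : Int))[i]? = some (-1) := by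
      simp [hi]
    have hrep0 : (List.replicate n (0 : Int))[i]? = some 0 := by
      simp [hi]
    by_cases hmem : ∃ e ∈ graph, (i : Int) ∈ e
    · have h1 : ((i : Int) ∈ sp) = False := by
        simp only [eq_iff_iff, iff_false]
        intro h
        exact ((hspMem _).mp h).2 ((htgMem _).mpr hmem)
      simp [h1, hmem, hrep1, show (i : Int) < (n : Int) by exact_mod_cast hi]
    · have h1 : (i : Int) ∈ sp := by
        refine (hspMem _).mpr ⟨⟨by positivity, by exact_mod_cast hi⟩, ?_⟩
        intro h; exact hmem ((htgMem _).mp h)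
      simp [h1, hmem, hrep0]
  · have h1 : ((i : Int) ∈ sp) = False := by
      simp only [eq_iff_iff, iff_false]
      intro h
      have := ((hspMem _).mp h).1.2
      omega
    have h2 : ¬ ((∃ e ∈ graph, (i : Int) ∈ e) ∧ (i : Int) < (n : Int)) := by
      rintro ⟨_, hlt⟩; omega
    simp [h1, hi]
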